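-- pv_equiv track=rewrite | github.com/Claraebrooks/sushi-go-qc | python/rosie.py | score_pudding
-- ===== SOURCE A (Python) =====
-- def score_pudding(counts: list[int]) -> list[int]:
--     """End-game pudding: +6 most, −6 fewest (2+ players)."""
--     bonuses = [0] * len(counts)
--     if len(counts) < 2:
--         return bonuses
--     hi = max(counts); lo = min(counts)
--     for i, p in enumerate(counts):
--         if p == hi: bonuses[i] +=  6 // sum(1 for x in counts if x == hi)
--         if p == lo: bonuses[i] += -6 // sum(1 for x in counts if x == lo)
--     return bonuses
-- ===== SOURCE B (Python) =====
-- def score_pudding(counts: list[int]) -> list[int]: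
--     """End-game pudding: +6 most, -6 fewest (2+ players)."""
--     bonuses = [0] * len(counts)
--     if len(counts) < 2:
--         return bonuses
--     groups = {}
--     for i, p in enumerate(counts):
--         groups.setdefault(p, []).append(i)
--     hi = max(groups)
--     lo = min(groups)
--     top = 6 // len(groups[hi])
--     for i in groups[hi]:
--         bonuses[i] += top
--     bot = -6 // len(groups[lo])
--     for i in groups[lo]:
--         bonuses[i] += bot
--     return bonuses
-- ===== Notes on version B (the rewrite author's own statement) =====
-- stated objective: faster
-- what changed: A rescans the whole list with max/min and a per-element generator count of the extreme values (quadratic); B builds a dict grouping each pudding count to its list of indices in one pass, takes max/min over the dict keys, and assigns bonuses by iterating only over the hi and lo index groups.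
import Mathlib
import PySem

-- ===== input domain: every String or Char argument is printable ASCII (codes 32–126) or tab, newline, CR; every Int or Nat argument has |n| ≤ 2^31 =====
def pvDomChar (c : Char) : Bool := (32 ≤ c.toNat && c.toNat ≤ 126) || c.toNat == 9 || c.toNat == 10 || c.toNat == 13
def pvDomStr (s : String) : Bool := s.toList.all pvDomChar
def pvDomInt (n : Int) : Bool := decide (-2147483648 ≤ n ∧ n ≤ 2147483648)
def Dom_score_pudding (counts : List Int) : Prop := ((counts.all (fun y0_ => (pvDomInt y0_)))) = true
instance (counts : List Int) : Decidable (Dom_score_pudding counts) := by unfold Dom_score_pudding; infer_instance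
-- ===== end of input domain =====

-- B replaces A's per-element rescan of the extremes by a dict grouping each pudding
-- count to its list of indices, assigning bonuses only over the hi/lo groups; objective: faster.


-- ===== PORT A =====
def score_pudding (counts : List Int) : List Int :=
  let bonuses := List.replicate counts.length (0 : Int)
  if counts.length < 2 then bonuses
  else
    match PySem.List.max? counts (fun x => x), PySem.List.min? counts (fun x => x) with
    | some hi, some lo =>
        (PySem.List.enumerate counts 0).foldl
          (fun b ip =>
            let b := if ip.2 = hi then
                PySem.List.pySetD b ip.1 (PySem.List.pyGetD b ip.1 0 +
                  PySem.Int.floordiv 6 (counts.foldl (fun a x => if x = hi then a + 1 else a) 0))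
              else b
            if ip.2 = lo then
                PySem.List.pySetD b ip.1 (PySem.List.pyGetD b ip.1 0 +
                  PySem.Int.floordiv (-6) (counts.foldl (fun a x => if x = lo then a + 1 else a) 0))
              else b)
          bonuses
    | _, _ => bonuses

-- ===== PORT B =====
-- groups: dict pudding-count -> list of indices (setdefault(p, []).append(i) = modify p [] (· ++ [i]))
def score_pudding_alt (counts : List Int) : List Int :=
  let bonuses := List.replicate counts.length (0 : Int)
  if counts.length < 2 then bonuses
  else
    let groups := (PySem.List.enumerate counts 0).foldl
      (fun (d : PySem.Dict Int (List Int)) ip => d.modify ip.2 [] (fun l => l ++ [ip.1]))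
      PySem.Dict.empty
    match PySem.List.max? groups.keys (fun x => x) with
    | none => bonuses
    | some hi =>
      match PySem.List.min? groups.keys (fun x => x) with
      | none => bonuses
      | some lo =>
        let top := PySem.Int.floordiv 6 ((groups.getD hi []).length : Int)
        let b1 := (groups.getD hi []).foldl
          (fun b i => PySem.List.pySetD b i (PySem.List.pyGetD b i 0 + top)) bonuses
        let bot := PySem.Int.floordiv (-6) ((groups.getD lo []).length : Int)
        (groups.getD lo []).foldl
          (fun b i => PySem.List.pySetD b i (PySem.List.pyGetD b i 0 + bot)) b1

-- ===== PRECONDITION & SPEC =====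
def Spec_score_pudding (counts : List Int) (out : List Int) : Prop := out = score_pudding_alt counts
instance (counts : List Int) (out : List Int) : Decidable (Spec_score_pudding counts out) := by unfold Spec_score_pudding; infer_instance

-- ===== CLAIM =====
def Claim_equal_score_pudding : Prop := ∀ (counts : List Int), Dom_score_pudding counts → Spec_score_pudding counts (score_pudding counts)

-- ===== LEMMAS AND PROOFS =====

-- sum(1 for x in counts if x == v) is the count of v
theorem countFold (xs : List Int) (v : Int) : ∀ (a : Int),
    xs.foldl (fun a x => if x = v then a + 1 else a) a = a + (xs.count v : Int) := by
  induction xs with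
  | nil => intro a; simp
  | cons y ys ih =>
    intro a
    by_cases h : y = v <;> simp [h, ih] <;> push_cast <;> ring

theorem set_mid : ∀ (pre : List Int) (x v : Int) (tail : List Int),
    (pre ++ x :: tail).set pre.length v = pre ++ v :: tail := by
  intro pre
  induction pre with
  | nil => intro x v tail; simp
  | cons a pre ih => intro x v tail; simp [ih]

theorem getD_mid : ∀ (pre : List Int) (x : Int) (tail : List Int),
    (pre ++ x :: tail).getD pre.length 0 = x := by
  intro pre
  induction pre with
  | nil => intro x tail; simp
  | cons a pre ih => intro x tail; simpa using ih x tail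

-- A's enumerate loop writes f p at each index of an all-zero tail
theorem loopA (hi lo t u : Int) : ∀ (rest pre : List Int),
    (PySem.List.enumerate rest (pre.length : Int)).foldl
      (fun b ip =>
        let b := if ip.2 = hi then
            PySem.List.pySetD b ip.1 (PySem.List.pyGetD b ip.1 0 + t) else b
        if ip.2 = lo then
            PySem.List.pySetD b ip.1 (PySem.List.pyGetD b ip.1 0 + u) else b)
      (pre ++ List.replicate rest.length 0)
    = pre ++ rest.map (fun p => (if p = hi then t else 0) + (if p = lo then u else 0)) := by
  intro rest
  induction rest with
  | nil => intro pre; simp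
  | cons p rest ih =>
    intro pre
    rw [PySem.List.enumerate_cons, List.length_cons, List.replicate_succ, List.foldl_cons]
    have key : (let b := (if ((pre.length : Int), p).2 = hi then (PySem.List.pySetD (pre ++ 0 :: List.replicate rest.length 0) ((pre.length : Int), p).1 (PySem.List.pyGetD (pre ++ 0 :: List.replicate rest.length 0) ((pre.length : Int), p).1 0 + t)) else (pre ++ 0 :: List.replicate rest.length 0)); (if ((pre.length : Int), p).2 = lo then (PySem.List.pySetD b ((pre.length : Int), p).1 (PySem.List.pyGetD b ((pre.length : Int), p).1 0 + u)) else b))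
      = pre ++ ((if p = hi then t else 0) + (if p = lo then u else 0)) :: List.replicate rest.length 0 := by
      simp only [PySem.List.pySetD_natCast, PySem.List.pyGetD_natCast]
      split_ifs with h1 h2 h3 <;> simp [set_mid, getD_mid]
    rw [key]
    have cast1 : (pre.length : Int) + 1
        = (((pre ++ [(if p = hi then t else 0) + (if p = lo then u else 0)]).length : Nat) : Int) := by
      simp
    have assoc : pre ++ ((if p = hi then t else 0) + (if p = lo then u else 0)) :: List.replicate rest.length 0
        = (pre ++ [(if p = hi then t else 0) + (if p = lo then u else 0)]) ++ List.replicate rest.length 0 := by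
      simp
    rw [cast1, assoc, ih]
    simp

-- the index list B's dict stores under key v
def Jv (counts : List Int) (v : Int) : List Int :=
  ((PySem.List.enumerate counts 0).filter (fun ip => ip.2 == v)).map (fun ip => ip.1)

theorem group_getD (counts : List Int) (v : Int) :
    ((PySem.List.enumerate counts 0).foldl
      (fun (d : PySem.Dict Int (List Int)) ip => d.modify ip.2 [] (fun l => l ++ [ip.1]))
      PySem.Dict.empty).getD v [] = Jv counts v := by
  have h1 : (PySem.List.enumerate counts 0).foldl
      (fun (d : PySem.Dict Int (List Int)) ip => d.modify ip.2 [] (fun l => l ++ [ip.1]))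
      PySem.Dict.empty
      = ((PySem.List.enumerate counts 0).map Prod.swap).foldl
        (fun (d : PySem.Dict Int (List Int)) p => d.modify p.1 [] (fun l => l ++ [p.2]))
        PySem.Dict.empty := by
    rw [List.foldl_map]; rfl
  rw [h1, PySem.Dict.getD_foldl_modify_append]
  simp [Jv, List.filter_map, Function.comp_def, Prod.swap]

theorem group_keys (counts : List Int) (x : Int) :
    (x ∈ ((PySem.List.enumerate counts 0).foldl
      (fun (d : PySem.Dict Int (List Int)) ip => d.modify ip.2 [] (fun l => l ++ [ip.1]))
      PySem.Dict.empty).keys) ↔ x ∈ counts := by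
  have hk : ((PySem.List.enumerate counts 0).foldl
      (fun (d : PySem.Dict Int (List Int)) ip => d.modify ip.2 [] (fun l => l ++ [ip.1]))
      PySem.Dict.empty).keys
      = PySem.Set.update (PySem.Dict.empty : PySem.Dict Int (List Int)).keys
        ((PySem.List.enumerate counts 0).map (fun ip => ip.2)) :=
    PySem.Dict.keys_foldl_modify_key _ _ _ _ _
  rw [hk, PySem.Set.mem_update, PySem.List.map_snd_enumerate]
  simp [PySem.Dict.keys_empty]
theorem Jv_bounds (counts : List Int) (v : Int) :
    ∀ i ∈ Jv counts v, 0 ≤ i ∧ i.toNat < counts.length := by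
  intro i hi
  unfold Jv at hi
  obtain ⟨ip, hmem, rfl⟩ := List.mem_map.mp hi
  have := List.mem_filter.mp hmem
  obtain ⟨k, hk, rfl⟩ := (PySem.List.mem_enumerate_iff counts 0 ip).mp this.1
  constructor <;> simp <;> omega

theorem Jv_length (v : Int) : ∀ (counts : List Int) (s : Int),
    (((PySem.List.enumerate counts s).filter (fun ip => ip.2 == v)).map
      (fun ip => ip.1)).length = counts.count v := by
  intro counts
  induction counts with
  | nil => intro s; simp
  | cons x xs ih =>
    intro s
    rw [PySem.List.enumerate_cons, List.count_cons, List.filter_cons]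
    by_cases h : x = v
    · have hb : (((s, x).2 : Int) == v) = true := by simp [h]
      rw [hb, if_pos rfl, List.map_cons, List.length_cons, ih (s+1)]
      simp [h]
    · have hb : (((s, x).2 : Int) == v) = false := by simp [h]
      rw [hb]
      simp only [if_neg Bool.false_ne_true]
      rw [ih (s+1)]
      simp [h]
theorem Jv_count (v : Int) : ∀ (counts : List Int) (s j : Int),
    (((PySem.List.enumerate counts s).filter (fun ip => ip.2 == v)).map
      (fun ip => ip.1)).count j
    = if s ≤ j ∧ j - s < (counts.length : Int) ∧ counts.getD (j - s).toNat (v + 1) = v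
      then 1 else 0 := by
  intro counts
  induction counts with
  | nil =>
    intro s j
    simp only [PySem.List.enumerate_nil, List.filter_nil, List.map_nil, List.count_nil,
      List.length_nil, List.getD_nil]
    have : ¬ (s ≤ j ∧ j - s < ((0:Nat) : Int) ∧ v + 1 = v) := by push_cast; omega
    rw [if_neg this]
  | cons x xs ih =>
    intro s j
    rw [PySem.List.enumerate_cons, List.filter_cons]
    by_cases hxv : x = v
    · have hb : (((s, x).2 : Int) == v) = true := by simp [hxv]
      rw [hb, if_pos rfl, List.map_cons, List.count_cons, ih (s+1) j]
      by_cases hjs : j = s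
      · subst hjs
        have h2 : ¬ ((j:Int) + 1 ≤ j) := by omega
        simp [h2, hxv]
      · have hne : ((s : Int) == j) = false := by simp; omega
        rw [hne]
        simp only [if_neg Bool.false_ne_true, add_zero]
        by_cases hlt : s ≤ j
        · have hsl : s + 1 ≤ j := by omega
          have htn : (j - s).toNat = (j - (s+1)).toNat + 1 := by omega
          rw [htn]
          simp only [List.getD_cons_succ, List.length_cons]
          have hiff : (s + 1 ≤ j ∧ j - (s+1) < (xs.length : Int) ∧ xs.getD (j - (s+1)).toNat (v+1) = v)
              ↔ (s ≤ j ∧ j - s < ((xs.length : Int) + 1) ∧ xs.getD (j - (s+1)).toNat (v+1) = v) := by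
            constructor
            · rintro ⟨_, h2, h3⟩; exact ⟨hlt, by omega, h3⟩
            · rintro ⟨_, h2, h3⟩; exact ⟨hsl, by omega, h3⟩
          rw [if_congr hiff rfl rfl]
          push_cast
          rfl
        · have h2 : ¬ (s + 1 ≤ j) := by omega
          simp [h2, hlt]
    · have hb : (((s, x).2 : Int) == v) = false := by simp [hxv]
      rw [hb]
      simp only [if_neg Bool.false_ne_true]
      rw [ih (s+1) j]
      by_cases hjs : j = s
      · subst hjs
        have h2 : ¬ ((j:Int) + 1 ≤ j) := by omega
        simp [h2, hxv]
      · by_cases hlt : s ≤ j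
        · have hsl : s + 1 ≤ j := by omega
          have htn : (j - s).toNat = (j - (s+1)).toNat + 1 := by omega
          rw [htn]
          simp only [List.getD_cons_succ, List.length_cons]
          have hiff : (s + 1 ≤ j ∧ j - (s+1) < (xs.length : Int) ∧ xs.getD (j - (s+1)).toNat (v+1) = v)
              ↔ (s ≤ j ∧ j - s < ((xs.length : Int) + 1) ∧ xs.getD (j - (s+1)).toNat (v+1) = v) := by
            constructor
            · rintro ⟨_, h2, h3⟩; exact ⟨hlt, by omega, h3⟩
            · rintro ⟨_, h2, h3⟩; exact ⟨hsl, by omega, h3⟩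
          rw [if_congr hiff rfl rfl]
          push_cast
          rfl
        · have h2 : ¬ (s + 1 ≤ j) := by omega
          simp [h2, hlt]
theorem getD_set' (l : List Int) (i m : Nat) (a : Int) :
    (l.set i a).getD m 0 = if m = i ∧ i < l.length then a else l.getD m 0 := by
  induction l generalizing i m with
  | nil => simp
  | cons x xs ih =>
    cases i with
    | zero =>
      cases m with
      | zero => simp
      | succ m => simp
    | succ i =>
      cases m with
      | zero => simp
      | succ m =>
        simp only [List.set_cons_succ, List.getD_cons_succ, List.length_cons, ih i m]
        have : (m = i ∧ i < xs.length) ↔ (m + 1 = i + 1 ∧ i + 1 < xs.length + 1) := by omega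
        rw [if_congr this rfl rfl]
theorem scatter_length (t : Int) : ∀ (idxs bs : List Int),
    (idxs.foldl (fun b i => PySem.List.pySetD b i (PySem.List.pyGetD b i 0 + t)) bs).length
      = bs.length := by
  intro idxs
  induction idxs with
  | nil => intro bs; simp
  | cons i idxs ih => intro bs; rw [List.foldl_cons, ih, PySem.List.length_pySetD]

theorem scatter_getD (t : Int) : ∀ (idxs bs : List Int),
    (∀ i ∈ idxs, 0 ≤ i ∧ i.toNat < bs.length) → ∀ (m : Nat),
    (idxs.foldl (fun b i => PySem.List.pySetD b i (PySem.List.pyGetD b i 0 + t)) bs).getD m 0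
      = bs.getD m 0 + (idxs.count (m : Int)) * t := by
  intro idxs
  induction idxs with
  | nil => intro bs _ m; simp
  | cons i idxs ih =>
    intro bs hb m
    obtain ⟨hi0, hilen⟩ := hb i (List.mem_cons_self)
    have hcast : i = ((i.toNat : Nat) : Int) := by omega
    rw [List.foldl_cons, hcast, PySem.List.pySetD_natCast, PySem.List.pyGetD_natCast]
    have hb' : ∀ j ∈ idxs, 0 ≤ j ∧ j.toNat < (bs.set i.toNat (bs.getD i.toNat 0 + t)).length := by
      intro j hj
      have := hb j (List.mem_cons_of_mem _ hj)
      simpa using this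
    rw [ih _ hb' m, getD_set', List.count_cons]
    by_cases hmi : (m : Nat) = i.toNat
    · have hbeq : (((i.toNat : Nat) : Int) == ((m : Nat) : Int)) = true := by simp; omega
      rw [hbeq, if_pos ⟨hmi, hilen⟩]
      subst hmi
      simp
      ring
    · have hbeq : (((i.toNat : Nat) : Int) == ((m : Nat) : Int)) = false := by simp; omega
      have hng : ¬ ((m : Nat) = i.toNat ∧ i.toNat < bs.length) := by tauto
      rw [hbeq, if_neg hng]
      simp
theorem ext_getD (l1 l2 : List Int) (hlen : l1.length = l2.length)
    (h : ∀ m : Nat, m < l1.length → l1.getD m 0 = l2.getD m 0) : l1 = l2 := by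
  apply List.ext_getElem hlen
  intro m h1 h2
  have := h m h1
  rwa [List.getD_eq_getElem _ _ h1, List.getD_eq_getElem _ _ h2] at this

-- ===== VERDICT (by name: the statement is the Claim_ definition above) =====
theorem score_pudding_spec : Claim_equal_score_pudding := by
  unfold Claim_equal_score_pudding
  intro counts _dom
  unfold Spec_score_pudding
  by_cases hlen : counts.length < 2
  · simp [score_pudding, score_pudding_alt, hlen]
  · cases counts with
    | nil => simp at hlen
    | cons c0 tl =>
      unfold score_pudding score_pudding_alt
      rw [if_neg hlen, if_neg hlen]
      rw [PySem.List.max?_id_cons, PySem.List.min?_id_cons]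
      dsimp only
      set counts := c0 :: tl with hc
      set hiA := tl.foldl max c0 with hhiA
      set loA := tl.foldl min c0 with hloA
      set groups := (PySem.List.enumerate counts 0).foldl
        (fun (d : PySem.Dict Int (List Int)) ip => d.modify ip.2 [] (fun l => l ++ [ip.1]))
        PySem.Dict.empty with hg
      -- keys membership
      have hkeys : ∀ x, x ∈ groups.keys ↔ x ∈ counts := fun x => group_keys counts x
      have hiAmem : hiA ∈ counts := by
        rcases PySem.List.foldl_max_mem tl c0 with h | h
        · rw [hhiA, h]; exact List.mem_cons_self
        · exact List.mem_cons_of_mem _ (hhiA ▸ h)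
      have loAmem : loA ∈ counts := by
        rcases PySem.List.foldl_min_mem tl c0 with h | h
        · rw [hloA, h]; exact List.mem_cons_self
        · exact List.mem_cons_of_mem _ (hloA ▸ h)
      -- the match scrutinees
      cases hmax : PySem.List.max? groups.keys (fun x => x) with
      | none =>
        exfalso
        have := (PySem.List.max?_eq_none_iff groups.keys (fun x => x)).mp hmax
        have : hiA ∈ groups.keys := (hkeys hiA).mpr hiAmem
        simp_all
      | some hiB =>
      cases hmin : PySem.List.min? groups.keys (fun x => x) with
      | none =>
        exfalso
        have := (PySem.List.min?_eq_none_iff groups.keys (fun x => x)).mp hmin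
        have : loA ∈ groups.keys := (hkeys loA).mpr loAmem
        simp_all
      | some loB =>
      -- extremes agree
      have hhieq : hiB = hiA := by
        have h1 : hiB ∈ counts := (hkeys hiB).mp (PySem.List.max?_mem hmax)
        have h2 : hiB ≤ hiA := by
          rw [hc] at h1
          rcases List.mem_cons.mp h1 with h | h
          · rw [h, hhiA]; exact (PySem.List.le_foldl_max tl c0).1
          · exact (PySem.List.le_foldl_max tl c0).2 _ h
        have h3 : hiA ≤ hiB := PySem.List.max?_isMax hmax hiA ((hkeys hiA).mpr hiAmem)
        omega
      have hloeq : loB = loA := by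
        have h1 : loB ∈ counts := (hkeys loB).mp (PySem.List.min?_mem hmin)
        have h2 : loA ≤ loB := by
          rw [hc] at h1
          rcases List.mem_cons.mp h1 with h | h
          · rw [h, hloA]; exact (PySem.List.foldl_min_le tl c0).1
          · exact (PySem.List.foldl_min_le tl c0).2 _ h
        have h3 : loB ≤ loA := PySem.List.min?_isMin hmin loA ((hkeys loA).mpr loAmem)
        omega
      subst hhieq hloeq
      -- groups lookups
      have hghi : groups.getD hiA [] = Jv counts hiA := group_getD counts hiA
      have hglo : groups.getD loA [] = Jv counts loA := group_getD counts loA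
      -- A side: loop over enumerate produces the map
      have hA := loopA hiA loA
        (PySem.Int.floordiv 6 (counts.foldl (fun a x => if x = hiA then a + 1 else a) 0))
        (PySem.Int.floordiv (-6) (counts.foldl (fun a x => if x = loA then a + 1 else a) 0))
        counts []
      simp only [List.length_nil, Nat.cast_zero, List.nil_append] at hA
      rw [hA]
      simp only [countFold, zero_add]
      set t := PySem.Int.floordiv 6 ((counts.count hiA : Nat) : Int) with ht
      set u := PySem.Int.floordiv (-6) ((counts.count loA : Nat) : Int) with hu
      -- B side lengths/values
      have hJhiL : (Jv counts hiA).length = counts.count hiA := Jv_length hiA counts 0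
      have hJloL : (Jv counts loA).length = counts.count loA := Jv_length loA counts 0
      rw [hghi, hglo, hJhiL, hJloL, ← ht, ← hu]
      -- elementwise
      have hb1len : ((Jv counts hiA).foldl
          (fun b i => PySem.List.pySetD b i (PySem.List.pyGetD b i 0 + t))
          (List.replicate counts.length 0)).length = counts.length := by
        rw [scatter_length]; simp
      apply Eq.symm
      apply ext_getD
      · rw [scatter_length, hb1len]; simp
      · intro m hm
        rw [scatter_length, hb1len] at hm
        have hbnd1 : ∀ i ∈ Jv counts hiA, 0 ≤ i ∧
            i.toNat < (List.replicate counts.length (0:Int)).length := by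
          intro i hi; have := Jv_bounds counts hiA i hi; simpa using this
        have hbnd2 : ∀ i ∈ Jv counts loA, 0 ≤ i ∧
            i.toNat < ((Jv counts hiA).foldl
              (fun b i => PySem.List.pySetD b i (PySem.List.pyGetD b i 0 + t))
              (List.replicate counts.length 0)).length := by
          intro i hi; have := Jv_bounds counts loA i hi; rw [hb1len]; exact this
        rw [scatter_getD u _ _ hbnd2 m, scatter_getD t _ _ hbnd1 m]
        rw [List.getD_replicate _ hm]
        have hcnt1 := Jv_count hiA counts 0 (m : Int)
        have hcnt2 := Jv_count loA counts 0 (m : Int)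
        unfold Jv
        rw [hcnt1, hcnt2]
        have hmap : (counts.map fun p => (if p = hiA then t else 0) + (if p = loA then u else 0)).getD m 0
            = (if counts.getD m (hiA+1) = hiA then t else 0) + (if counts.getD m (loA+1) = loA then u else 0) := by
          have hm' : m < counts.length := hm
          rw [List.getD_eq_getElem _ _ (by simpa using hm'), List.getElem_map,
            List.getD_eq_getElem _ _ hm', List.getD_eq_getElem _ _ hm']
        rw [hmap]
        have hc1 : ((0:Int) ≤ (m:Int) ∧ (m:Int) - 0 < (counts.length : Int) ∧
            counts.getD ((m:Int) - 0).toNat (hiA + 1) = hiA) ↔ counts.getD m (hiA+1) = hiA := by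
          constructor
          · rintro ⟨_, _, h⟩; simpa using h
          · intro h; refine ⟨by omega, by push_cast; omega, by simpa using h⟩
        have hc2 : ((0:Int) ≤ (m:Int) ∧ (m:Int) - 0 < (counts.length : Int) ∧
            counts.getD ((m:Int) - 0).toNat (loA + 1) = loA) ↔ counts.getD m (loA+1) = loA := by
          constructor
          · rintro ⟨_, _, h⟩; simpa using h
          · intro h; refine ⟨by omega, by push_cast; omega, by simpa using h⟩
        rw [if_congr hc1 rfl rfl, if_congr hc2 rfl rfl]
        split_ifs <;> ring
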